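-- pv_equiv track=rewrite | github.com/denoslab/FedCAB | data/generate_equal.py | choose_arbtr_digit
-- ===== SOURCE A (Python) =====
-- NUM_USER = 100
--
-- def choose_arbtr_digit(user):
--     lst = [[] for i in range(NUM_USER)]
--     lst[0] = [0, 1]
--     lst[1] = [1, 2]
--     lst[2] = [2, 3]
--     lst[3] = [3, 4]
--     lst[4] = [4, 5]
--     lst[5] = [5, 6]
--     lst[6] = [6, 7]
--     lst[7] = [7, 8]
--     lst[8] = [8, 9]
--     lst[9] = [9, 2]
--
--     ret = [[] for i in range(NUM_USER)]
--
--     for idx in range(10):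
--         for j in range(10):
--             ret[idx * 10 + j] = lst[idx]
--     return ret[user]
-- ===== SOURCE B (Python) =====
-- def choose_arbtr_digit(user):
--     lst = [[0, 1], [1, 2], [2, 3], [3, 4], [4, 5],
--            [5, 6], [6, 7], [7, 8], [8, 9], [9, 2]]
--     return lst[user // 10]
-- ===== Notes on version B (the rewrite author's own statement) =====
-- stated objective: simpler
-- what changed: Replaces the 100-element table built by nested loops with a 10-element literal table indexed directly by user // 10 (negative users map identically via Python negative indexing).
import Mathlib
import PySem

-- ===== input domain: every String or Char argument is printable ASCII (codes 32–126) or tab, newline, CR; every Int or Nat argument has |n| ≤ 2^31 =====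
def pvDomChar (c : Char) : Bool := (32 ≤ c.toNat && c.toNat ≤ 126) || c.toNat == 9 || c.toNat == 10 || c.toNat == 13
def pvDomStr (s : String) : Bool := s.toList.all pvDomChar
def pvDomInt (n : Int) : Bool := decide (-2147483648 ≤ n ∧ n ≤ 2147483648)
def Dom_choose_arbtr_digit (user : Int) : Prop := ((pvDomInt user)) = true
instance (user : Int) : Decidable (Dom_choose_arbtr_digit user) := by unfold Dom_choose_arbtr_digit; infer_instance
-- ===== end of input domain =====

-- B replaces A's 100-element table built by nested loops with a 10-element literal table indexed by user // 10 (simpler, same values).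


-- ===== PORT A =====
def choose_arbtr_digit (user : Int) : List Int :=
  -- lst = [[] for i in range(NUM_USER)]; lst[0] = [0,1]; … lst[9] = [9,2]
  let lst : List (List Int) := List.replicate 100 []
  let lst := PySem.List.pySetD lst 0 [0, 1]
  let lst := PySem.List.pySetD lst 1 [1, 2]
  let lst := PySem.List.pySetD lst 2 [2, 3]
  let lst := PySem.List.pySetD lst 3 [3, 4]
  let lst := PySem.List.pySetD lst 4 [4, 5]
  let lst := PySem.List.pySetD lst 5 [5, 6]
  let lst := PySem.List.pySetD lst 6 [6, 7]
  let lst := PySem.List.pySetD lst 7 [7, 8]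
  let lst := PySem.List.pySetD lst 8 [8, 9]
  let lst := PySem.List.pySetD lst 9 [9, 2]
  -- ret = [[] for i in range(NUM_USER)]
  let ret : List (List Int) := List.replicate 100 []
  -- for idx in range(10): for j in range(10): ret[idx*10+j] = lst[idx]
  let ret := (PySem.List.pyRange 0 10 1).foldl (fun ret idx =>
    (PySem.List.pyRange 0 10 1).foldl (fun ret j =>
      PySem.List.pySetD ret (idx * 10 + j) (PySem.List.pyGetD lst idx [])) ret) ret
  -- return ret[user]  (IndexError outside Pre_)
  PySem.List.pyGetD ret user []

-- ===== PORT B =====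
def choose_arbtr_digit_alt (user : Int) : List Int :=
  let lst : List (List Int) :=
    [[0, 1], [1, 2], [2, 3], [3, 4], [4, 5], [5, 6], [6, 7], [7, 8], [8, 9], [9, 2]]
  PySem.List.pyGetD lst (PySem.Int.floordiv user 10) []

-- ===== PRECONDITION & SPEC =====
-- Exactly the inputs on which the Python A returns (ret[user] without IndexError): -100 ≤ user < 100.
def Pre_choose_arbtr_digit (user : Int) : Prop := PySem.Raise.InRange 100 user
instance (user : Int) : Decidable (Pre_choose_arbtr_digit user) := by unfold Pre_choose_arbtr_digit; infer_instance
def pvWitness_choose_arbtr_digit : Int := (37)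
def Spec_choose_arbtr_digit (user : Int) (out : List Int) : Prop := out = choose_arbtr_digit_alt user
instance (user : Int) (out : List Int) : Decidable (Spec_choose_arbtr_digit user out) := by unfold Spec_choose_arbtr_digit; infer_instance

-- ===== CLAIM (what is proved, stated in full; the proofs are below) =====
def Claim_equal_choose_arbtr_digit : Prop := ∀ (user : Int), Dom_choose_arbtr_digit user → Pre_choose_arbtr_digit user → Spec_choose_arbtr_digit user (choose_arbtr_digit user)

-- ===== LEMMAS AND PROOFS =====

-- ===== VERDICT (by name: the statement is the Claim_ definition above) =====
set_option maxHeartbeats 4000000 in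
set_option maxRecDepth 10000 in
theorem choose_arbtr_digit_spec : Claim_equal_choose_arbtr_digit := by
  intro user _ hPre
  have h : -100 ≤ user ∧ user < 100 := by
    simpa [Pre_choose_arbtr_digit, PySem.Raise.InRange] using hPre
  unfold Spec_choose_arbtr_digit
  obtain ⟨h1, h2⟩ := h
  interval_cases user <;> decide
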